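-- pv_equiv track=rewrite | github.com/Pjmcnally/algo | utopia_tree.py | growth_dict
-- ===== SOURCE A (Python) =====
-- def growth_dict(num):
--     res_dict = {}
--     for val in range(num + 1):
--         total = res_dict.get(val - 1, 0)
--         if val % 2 == 0:
--             res_dict[val] = total + 1
--         else:
--             res_dict[val] = total * 2
--     return res_dict
-- ===== SOURCE B (Python) =====
-- def growth_dict(num):
--     return {
--         val: (2 ** (val // 2 + 1) - 1) if val % 2 == 0 else (2 ** (val // 2 + 2) - 2)
--         for val in range(num + 1)
--     }
-- ===== Notes on version B (the rewrite author's own statement) =====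
-- stated objective: alternative
-- what changed: B replaces A's carried previous-height accumulator (each dict entry derived from the previous entry) with a dict comprehension that computes every height independently by a closed-form power of two depending on the parity of the step.
import Mathlib
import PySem

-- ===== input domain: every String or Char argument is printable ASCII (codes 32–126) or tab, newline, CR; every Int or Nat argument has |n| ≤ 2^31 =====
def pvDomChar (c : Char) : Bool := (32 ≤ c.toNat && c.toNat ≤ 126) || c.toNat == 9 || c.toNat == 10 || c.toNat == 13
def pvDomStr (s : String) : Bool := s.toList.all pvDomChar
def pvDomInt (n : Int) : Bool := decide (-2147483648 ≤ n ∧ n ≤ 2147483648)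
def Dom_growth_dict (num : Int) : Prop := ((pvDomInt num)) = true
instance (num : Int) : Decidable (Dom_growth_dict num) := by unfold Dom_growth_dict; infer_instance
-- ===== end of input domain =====

-- B replaces A's carried previous-value accumulator with an independent closed form per key (objective: alternative).

-- ===== PORT A =====
def growth_dict (num : Int) : List (Int × Int) :=
  ((PySem.List.pyRange 0 (num + 1) 1).foldl
    (fun d val =>
      let total := d.getD (val - 1) 0
      if PySem.Int.mod val 2 = 0 then d.insert val (total + 1)
      else d.insert val (total * 2))
    PySem.Dict.empty).items

-- ===== PORT B =====
-- dict comprehension over range(num+1): keys are distinct and in order, so the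
-- resulting insertion-ordered association list is exactly this map (exact port).
def growth_dict_alt (num : Int) : List (Int × Int) :=
  (PySem.List.pyRange 0 (num + 1) 1).map
    (fun val =>
      (val, if PySem.Int.mod val 2 = 0
            then 2 ^ (PySem.Int.floordiv val 2 + 1).toNat - 1
            else 2 ^ (PySem.Int.floordiv val 2 + 2).toNat - 2))

-- ===== PRECONDITION & SPEC =====
def Spec_growth_dict (num : Int) (out : List (Int × Int)) : Prop := out = growth_dict_alt num
instance (num : Int) (out : List (Int × Int)) : Decidable (Spec_growth_dict num out) := by unfold Spec_growth_dict; infer_instance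

-- ===== CLAIM (what is proved, stated in full; the proofs are below) =====
def Claim_equal_growth_dict : Prop := ∀ (num : Int), Dom_growth_dict num → Spec_growth_dict num (growth_dict num)

-- ===== LEMMAS AND PROOFS =====

-- B's closed form, as a function (used only by the proofs).
def pvF (v : Int) : Int :=
  if PySem.Int.mod v 2 = 0
  then 2 ^ (PySem.Int.floordiv v 2 + 1).toNat - 1
  else 2 ^ (PySem.Int.floordiv v 2 + 2).toNat - 2

lemma pvF_natCast (n : Nat) :
    pvF (n : Int) = if n % 2 = 0 then 2 ^ (n / 2 + 1) - 1 else 2 ^ (n / 2 + 2) - 2 := by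
  unfold pvF
  have hm : PySem.Int.mod (n : Int) 2 = ((n % 2 : Nat) : Int) := by
    exact_mod_cast PySem.Int.mod_natCast n 2
  have hd : PySem.Int.floordiv (n : Int) 2 = ((n / 2 : Nat) : Int) := by
    exact_mod_cast PySem.Int.floordiv_natCast n 2
  have e1 : (((n / 2 : Nat) : Int) + 1).toNat = n / 2 + 1 := by omega
  have e2 : (((n / 2 : Nat) : Int) + 2).toNat = n / 2 + 2 := by omega
  rw [hm, hd, e1, e2]
  by_cases h : n % 2 = 0
  · rw [if_pos (by exact_mod_cast h), if_pos h]
  · rw [if_neg (by exact_mod_cast h), if_neg h]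

-- the recurrence A computes is satisfied by the closed form
lemma pvF_succ (n : Nat) :
    pvF ((n : Int) + 1) =
      if PySem.Int.mod ((n : Int) + 1) 2 = 0 then pvF (n : Int) + 1 else pvF (n : Int) * 2 := by
  have h1 : ((n : Int) + 1) = ((n + 1 : Nat) : Int) := by push_cast; ring
  have hm : PySem.Int.mod ((n + 1 : Nat) : Int) 2 = (((n + 1) % 2 : Nat) : Int) := by
    exact_mod_cast PySem.Int.mod_natCast (n + 1) 2
  rw [h1, pvF_natCast, pvF_natCast, hm]
  rcases Nat.even_or_odd n with he | ho
  · obtain ⟨k, hk⟩ := he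
    have h2 : (n + 1) % 2 = 1 := by omega
    have h3 : (n + 1) / 2 = k := by omega
    have h4 : n % 2 = 0 := by omega
    have h5 : n / 2 = k := by omega
    simp only [h2, h3, h4, h5]
    norm_num [pow_succ]
    ring
  · obtain ⟨k, hk⟩ := ho
    have h2 : (n + 1) % 2 = 0 := by omega
    have h3 : (n + 1) / 2 = k + 1 := by omega
    have h4 : n % 2 = 1 := by omega
    have h5 : n / 2 = k := by omega
    simp only [h2, h3, h4, h5]
    norm_num [pow_succ]
    ring

def pvStep (d : PySem.Dict Int Int) (val : Int) : PySem.Dict Int Int :=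
  let total := d.getD (val - 1) 0
  if PySem.Int.mod val 2 = 0 then d.insert val (total + 1)
  else d.insert val (total * 2)

def pvTable (n : Nat) : List (Int × Int) :=
  (PySem.List.pyRange 0 (n : Int) 1).map (fun v => (v, pvF v))

lemma pvKeys_table (n : Nat) :
    (PySem.Dict.mk (pvTable n)).keys = PySem.List.pyRange 0 (n : Int) 1 := by
  simp [pvTable, PySem.Dict.keys, Function.comp_def]

lemma pvNodup_keys_table (n : Nat) : (PySem.Dict.mk (pvTable n)).keys.Nodup := by
  rw [pvKeys_table]; exact PySem.List.nodup_pyRange_one 0 (n : Int)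

-- A's loop over 0..n-1 builds exactly the closed-form table
lemma pvLoop_eq_table (n : Nat) :
    (PySem.List.pyRange 0 (n : Int) 1).foldl pvStep PySem.Dict.empty
      = PySem.Dict.mk (pvTable n) := by
  induction n with
  | zero => decide
  | succ m ih =>
    have hsplit : PySem.List.pyRange 0 ((m + 1 : Nat) : Int) 1
        = PySem.List.pyRange 0 (m : Int) 1 ++ [(m : Int)] := by
      have : ((m + 1 : Nat) : Int) = (m : Int) + 1 := by push_cast; ring
      rw [this]
      exact PySem.List.pyRange_one_succ_right (by exact_mod_cast Nat.zero_le m)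
    rw [hsplit, List.foldl_append, ih]
    -- one more step of the loop
    have hget : (PySem.Dict.mk (pvTable m)).getD ((m : Int) - 1) 0 = if m = 0 then 0 else pvF ((m : Int) - 1) := by
      rcases Nat.eq_zero_or_pos m with hm | hm
      · subst hm; decide
      · have hmem : ((m : Int) - 1, pvF ((m : Int) - 1)) ∈ (PySem.Dict.mk (pvTable m)).items := by
          simp only [pvTable, List.mem_map]
          exact ⟨(m : Int) - 1, by rw [PySem.List.mem_pyRange_one]; omega, rfl⟩
        rw [if_neg (by omega : ¬ m = 0)]
        exact PySem.Dict.getD_of_mem_items _ hmem (pvNodup_keys_table m) 0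
    have hnc : (PySem.Dict.mk (pvTable m)).contains (m : Int) = false := by
      rw [PySem.Dict.contains_eq_decide_mem_keys, pvKeys_table]
      simp [PySem.List.mem_pyRange_one]
    have hval : pvF (m : Int) =
        if PySem.Int.mod (m : Int) 2 = 0
        then (PySem.Dict.mk (pvTable m)).getD ((m : Int) - 1) 0 + 1
        else (PySem.Dict.mk (pvTable m)).getD ((m : Int) - 1) 0 * 2 := by
      rcases Nat.eq_zero_or_pos m with hm | hm
      · subst hm; decide
      · obtain ⟨k, hk⟩ : ∃ k : Nat, m = k + 1 := ⟨m - 1, by omega⟩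
        subst hk
        have hc : ((k + 1 : Nat) : Int) = (k : Int) + 1 := by push_cast; ring
        have hm1 : ((k + 1 : Nat) : Int) - 1 = (k : Int) := by push_cast; ring
        rw [hget, if_neg (Nat.succ_ne_zero k), hm1, hc, pvF_succ k]
    have htab : pvTable (m + 1) = pvTable m ++ [((m : Int), pvF (m : Int))] := by
      simp only [pvTable, hsplit, List.map_append, List.map_cons, List.map_nil]
    apply PySem.Dict.ext
    rw [List.foldl_cons, List.foldl_nil]
    show (pvStep (PySem.Dict.mk (pvTable m)) (m : Int)).items = pvTable (m + 1)
    unfold pvStep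
    split_ifs with hpar
    · rw [PySem.Dict.items_insert_of_not_contains _ _ hnc, htab]
      rw [hval, if_pos hpar]
    · rw [PySem.Dict.items_insert_of_not_contains _ _ hnc, htab]
      rw [hval, if_neg hpar]

-- ===== VERDICT (by name: the statement is the Claim_ definition above) =====
theorem growth_dict_spec : Claim_equal_growth_dict := by
  intro num _
  unfold Spec_growth_dict growth_dict growth_dict_alt
  rw [show (fun (d : PySem.Dict Int Int) (val : Int) =>
      let total := d.getD (val - 1) 0
      if PySem.Int.mod val 2 = 0 then d.insert val (total + 1)
      else d.insert val (total * 2)) = pvStep from rfl]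
  by_cases h : num + 1 ≤ 0
  · rw [PySem.List.pyRange_one_eq_nil h]; rfl
  · have hn : num + 1 = (((num + 1).toNat : Nat) : Int) := by omega
    rw [hn, pvLoop_eq_table]
    rfl
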